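-- pv_equiv track=rewrite | github.com/ArthurSonzogni/chromiumos-platform2 | common-mk/meson_test.py | _translate_paths_in_env
-- ===== SOURCE A (Python) =====
-- from typing import Dict, List, Mapping, NoReturn
--
-- _PATH_ENV_VARS = (
--     # Used by dev-libs/wayland
--     "TEST_BUILD_DIR",
--     "TEST_SRC_DIR",
--     # Used by media-libs/harfbuzz, dev-libs/json-glib, app-arch/gcab,
--     # dev-libs/glib
--     "G_TEST_BUILDDIR",
--     "G_TEST_SRCDIR",
--     # Used by x11-libs/libxkbcommon
--     "top_builddir",
--     "top_srcdir",
-- )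
--
-- def _translate_path(path: str, sysroot: str) -> str:
--     """Remove the SYSROOT prefix from paths that have it."""
--     if path == sysroot:
--         return "/"
--     if path.startswith(sysroot):
--         return path[len(sysroot) :]
--     return path
--
-- def _translate_paths_in_env(
--     orig_env: Mapping[str, str], sysroot: str
-- ) -> Dict[str, str]:
--     """Translates paths contained in environment variables."""
--     new_env = {}
--     for key, value in orig_env.items():
--         if key in _PATH_ENV_VARS:
--             value = _translate_path(value, sysroot)
--         new_env[key] = value
--     return new_env
-- ===== SOURCE B (Python) =====
-- _PATH_ENV_VARS = (
--     "TEST_BUILD_DIR",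
--     "TEST_SRC_DIR",
--     "G_TEST_BUILDDIR",
--     "G_TEST_SRCDIR",
--     "top_builddir",
--     "top_srcdir",
-- )
--
--
-- def _translate_path(path: str, sysroot: str) -> str:
--     """Remove the SYSROOT prefix from paths that have it."""
--     if path == sysroot:
--         return "/"
--     if path.startswith(sysroot):
--         return path[len(sysroot):]
--     return path
--
--
-- def _translate_paths_in_env(orig_env, sysroot):
--     """Copy the environment, then patch only the fixed path variables."""
--     new_env = dict(orig_env)
--     for var in _PATH_ENV_VARS:
--         if var in new_env:
--             new_env[var] = _translate_path(new_env[var], sysroot)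
--     return new_env
-- ===== Notes on version B (the rewrite author's own statement) =====
-- stated objective: alternative
-- what changed: B copies the whole environment once with dict(orig_env) and then iterates only the fixed 6-name _PATH_ENV_VARS tuple, patching present keys in place, instead of A's loop over every env entry with a per-entry membership test against the tuple.
import Mathlib
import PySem

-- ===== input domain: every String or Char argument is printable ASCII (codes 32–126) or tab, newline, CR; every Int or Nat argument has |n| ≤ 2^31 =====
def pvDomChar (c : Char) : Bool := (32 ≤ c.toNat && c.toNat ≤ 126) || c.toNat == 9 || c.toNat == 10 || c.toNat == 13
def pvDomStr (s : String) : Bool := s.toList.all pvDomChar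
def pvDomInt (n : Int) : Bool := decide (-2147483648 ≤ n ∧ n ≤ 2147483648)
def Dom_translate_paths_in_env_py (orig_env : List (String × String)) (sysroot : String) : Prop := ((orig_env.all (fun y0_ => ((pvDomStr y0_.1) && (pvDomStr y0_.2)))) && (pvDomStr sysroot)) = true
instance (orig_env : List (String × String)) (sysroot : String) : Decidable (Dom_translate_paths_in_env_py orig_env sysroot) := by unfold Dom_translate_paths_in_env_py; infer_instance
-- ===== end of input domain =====

-- B iterates the fixed 6-name tuple and patches a copied dict in place, instead of A's scan
-- of every env entry with a membership test (objective: alternative decomposition, same result).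

-- ===== PORT A =====
-- _PATH_ENV_VARS (module constant, shared by both versions)
def pvPathEnvVars : List String :=
  ["TEST_BUILD_DIR", "TEST_SRC_DIR", "G_TEST_BUILDDIR", "G_TEST_SRCDIR",
   "top_builddir", "top_srcdir"]

-- _translate_path (helper, shared by both versions, transliterated line by line)
def pvTranslatePath (path : String) (sysroot : String) : String :=
  if path = sysroot then "/"
  else if PySem.Str.startswith path sysroot then
    PySem.Str.slice path (some (PySem.Str.len sysroot)) none
  else path

def translate_paths_in_env_py (orig_env : List (String × String)) (sysroot : String) :
    List (String × String) :=
  (orig_env.foldl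
    (fun (new_env : PySem.Dict String String) kv =>
      let value := if pvPathEnvVars.contains kv.1 then pvTranslatePath kv.2 sysroot else kv.2
      new_env.insert kv.1 value)
    PySem.Dict.empty).items

-- ===== PORT B =====
def translate_paths_in_env_py_alt (orig_env : List (String × String)) (sysroot : String) :
    List (String × String) :=
  (pvPathEnvVars.foldl
    (fun (new_env : PySem.Dict String String) var =>
      match new_env.get? var with            -- 'if var in new_env: new_env[var] = …'
      | some x => new_env.insert var (pvTranslatePath x sysroot)
      | none => new_env)
    (PySem.Dict.ofList orig_env)).items

-- ===== PRECONDITION & SPEC =====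
def Spec_translate_paths_in_env_py (orig_env : List (String × String)) (sysroot : String) (out : List (String × String)) : Prop := out = translate_paths_in_env_py_alt orig_env sysroot
instance (orig_env : List (String × String)) (sysroot : String) (out : List (String × String)) : Decidable (Spec_translate_paths_in_env_py orig_env sysroot out) := by unfold Spec_translate_paths_in_env_py; infer_instance

-- ===== CLAIM (what is proved, stated in full; the proofs are below) =====
def Claim_equal_translate_paths_in_env_py : Prop := ∀ (orig_env : List (String × String)) (sysroot : String), Dom_translate_paths_in_env_py orig_env sysroot → Spec_translate_paths_in_env_py orig_env sysroot (translate_paths_in_env_py orig_env sysroot)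

-- ===== LEMMAS AND PROOFS =====

-- the per-entry rewrite both loops realise: patch the value iff the key is a path var
def pvPatch (sysroot : String) (vs : List String) (p : String × String) : String × String :=
  if vs.contains p.1 then (p.1, pvTranslatePath p.2 sysroot) else p

theorem pvPatch_fst (sysroot : String) (vs : List String) (p : String × String) :
    (pvPatch sysroot vs p).1 = p.1 := by
  unfold pvPatch; split <;> rfl

-- one step of B's loop, as a map over the items (needs unique keys)
theorem pv_stepB_eq (sysroot v : String) (d : PySem.Dict String String)
    (hn : d.keys.Nodup) :
    (match d.get? v with
     | some x => d.insert v (pvTranslatePath x sysroot)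
     | none => d)
      = PySem.Dict.mk (d.items.map (pvPatch sysroot [v])) := by
  cases hg : d.get? v with
  | none =>
    have hv : v ∉ d.keys := (PySem.Dict.get?_eq_none_iff_not_mem_keys d v).mp hg
    have h1 : ∀ p ∈ d.items, pvPatch sysroot [v] p = p := by
      intro p hp
      have : p.1 ≠ v := by
        intro h; exact hv (h ▸ PySem.Dict.mem_keys_of_mem_items d hp)
      simp [pvPatch, this]
    simp only
    apply PySem.Dict.ext
    rw [show (PySem.Dict.mk (d.items.map (pvPatch sysroot [v]))).items
          = d.items.map (pvPatch sysroot [v]) from rfl,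
        List.map_congr_left h1, List.map_id']
  | some x =>
    have hc : d.contains v = true := by
      rw [PySem.Dict.contains_eq_isSome_get?, hg]; rfl
    simp only
    apply PySem.Dict.ext
    rw [PySem.Dict.items_insert_of_contains d _ hc]
    show _ = d.items.map (pvPatch sysroot [v])
    apply List.map_congr_left
    intro p hp
    by_cases h : p.1 = v
    · have hx : p.2 = x := by
        have := PySem.Dict.get?_of_mem_items d (h ▸ (by simpa using hp) :
          (v, p.2) ∈ d.items) hn
        rw [hg] at this; exact (Option.some_injective _ this).symm
      simp [pvPatch, h, hx]
    · simp [pvPatch, h]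

-- B's whole loop over distinct vars = one map over the items
theorem pv_foldB_eq (sysroot : String) :
    ∀ (vs : List String) (d : PySem.Dict String String), vs.Nodup → d.keys.Nodup →
    vs.foldl
      (fun (new_env : PySem.Dict String String) var =>
        match new_env.get? var with
        | some x => new_env.insert var (pvTranslatePath x sysroot)
        | none => new_env) d
      = PySem.Dict.mk (d.items.map (pvPatch sysroot vs)) := by
  intro vs
  induction vs with
  | nil =>
    intro d _ _
    apply PySem.Dict.ext
    show d.items = d.items.map (pvPatch sysroot [])
    rw [List.map_congr_left (fun p _ => by simp [pvPatch] :
         ∀ p ∈ d.items, pvPatch sysroot [] p = p), List.map_id']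
  | cons v vs ih =>
    intro d hvs hn
    rw [List.foldl_cons, pv_stepB_eq sysroot v d hn]
    have hn' : (PySem.Dict.mk (d.items.map (pvPatch sysroot [v]))).keys.Nodup := by
      rw [PySem.Dict.keys_mk, List.map_map]
      have : ((fun x : String × String => x.1) ∘ pvPatch sysroot [v]) =
          (fun x : String × String => x.1) := by
        funext p; exact pvPatch_fst sysroot [v] p
      rw [this]
      exact hn
    rw [ih _ (List.Nodup.of_cons hvs) hn']
    apply PySem.Dict.ext
    show (d.items.map (pvPatch sysroot [v])).map (pvPatch sysroot vs)
        = d.items.map (pvPatch sysroot (v :: vs))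
    rw [List.map_map]
    apply List.map_congr_left
    intro p _
    have hv : v ∉ vs := (List.nodup_cons.mp hvs).1
    by_cases h : p.1 = v
    · have h2 : p.1 ∉ vs := h ▸ hv
      simp [pvPatch, h, hv]
    · by_cases h3 : p.1 ∈ vs <;> simp [pvPatch, h, h3]

-- fst-preservation: patching the values does not change contains/keys
theorem pv_contains_map_patch (sysroot : String) (vs : List String)
    (l : List (String × String)) (k : String) :
    (PySem.Dict.mk (l.map (pvPatch sysroot vs))).contains k
      = (PySem.Dict.mk l).contains k := by
  rw [PySem.Dict.contains_mk, PySem.Dict.contains_mk, List.any_map]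
  have : ((fun p : String × String => p.1 == k) ∘ pvPatch sysroot vs)
      = (fun p : String × String => p.1 == k) := by
    funext p
    show ((pvPatch sysroot vs p).1 == k) = (p.1 == k)
    rw [pvPatch_fst]
  rw [this]

-- inserting the patched value commutes with patching all values
theorem pv_insert_map (sysroot : String) (d : PySem.Dict String String)
    (k v : String) :
    (PySem.Dict.mk (d.items.map (pvPatch sysroot pvPathEnvVars))).insert k
        (if pvPathEnvVars.contains k then pvTranslatePath v sysroot else v)
      = PySem.Dict.mk ((d.insert k v).items.map (pvPatch sysroot pvPathEnvVars)) := by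
  have hkv : pvPatch sysroot pvPathEnvVars (k, v)
      = (k, if pvPathEnvVars.contains k then pvTranslatePath v sysroot else v) := by
    unfold pvPatch; split <;> rfl
  have hcd : (PySem.Dict.mk (d.items.map (pvPatch sysroot pvPathEnvVars))).contains k
      = d.contains k := pv_contains_map_patch sysroot pvPathEnvVars d.items k
  apply PySem.Dict.ext
  cases hc : d.contains k with
  | false =>
    rw [PySem.Dict.items_insert_of_not_contains _ _ (hcd.trans hc),
        PySem.Dict.items_insert_of_not_contains d _ hc]
    show d.items.map (pvPatch sysroot pvPathEnvVars) ++ [(k, _)]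
        = (d.items ++ [(k, v)]).map (pvPatch sysroot pvPathEnvVars)
    rw [List.map_append, List.map_singleton, hkv]
  | true =>
    rw [PySem.Dict.items_insert_of_contains _ _ (hcd.trans hc),
        PySem.Dict.items_insert_of_contains d _ hc]
    show (d.items.map (pvPatch sysroot pvPathEnvVars)).map _
        = (d.items.map _).map (pvPatch sysroot pvPathEnvVars)
    rw [List.map_map, List.map_map]
    apply List.map_congr_left
    intro p _
    by_cases h : p.1 = k
    · by_cases hm : k ∈ pvPathEnvVars <;> simp [pvPatch, h, hm]
    · by_cases hm : p.1 ∈ pvPathEnvVars <;> simp [pvPatch, h, hm]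

-- dict-building commutes with patching the values
theorem pv_foldA_eq (sysroot : String) :
    ∀ (l : List (String × String)) (d : PySem.Dict String String),
    l.foldl
      (fun (new_env : PySem.Dict String String) kv =>
        let value := if pvPathEnvVars.contains kv.1 then pvTranslatePath kv.2 sysroot else kv.2
        new_env.insert kv.1 value)
      (PySem.Dict.mk (d.items.map (pvPatch sysroot pvPathEnvVars)))
      = PySem.Dict.mk
          ((l.foldl (fun (acc : PySem.Dict String String) p => acc.insert p.1 p.2) d).items.map
            (pvPatch sysroot pvPathEnvVars)) := by
  intro l
  induction l with
  | nil => intro d; rfl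
  | cons kv l ih =>
    intro d
    rw [List.foldl_cons, List.foldl_cons]
    show List.foldl _ ((PySem.Dict.mk (d.items.map (pvPatch sysroot pvPathEnvVars))).insert kv.1
      (if pvPathEnvVars.contains kv.1 then pvTranslatePath kv.2 sysroot else kv.2)) l = _
    rw [pv_insert_map sysroot d kv.1 kv.2]
    exact ih (d.insert kv.1 kv.2)

-- ===== VERDICT (by name: the statement is the Claim_ definition above) =====
theorem translate_paths_in_env_py_spec : Claim_equal_translate_paths_in_env_py := by
  intro orig_env sysroot _
  unfold Spec_translate_paths_in_env_py
  unfold translate_paths_in_env_py translate_paths_in_env_py_alt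
  rw [pv_foldB_eq sysroot pvPathEnvVars (PySem.Dict.ofList orig_env) (by decide)
      (PySem.Dict.nodup_keys_ofList orig_env)]
  have h0 : (PySem.Dict.empty : PySem.Dict String String)
      = PySem.Dict.mk (((PySem.Dict.empty : PySem.Dict String String)).items.map
          (pvPatch sysroot pvPathEnvVars)) := rfl
  rw [show (PySem.Dict.ofList orig_env : PySem.Dict String String)
        = orig_env.foldl (fun (acc : PySem.Dict String String) p => acc.insert p.1 p.2)
            PySem.Dict.empty from rfl]
  calc (orig_env.foldl
          (fun (new_env : PySem.Dict String String) kv =>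
            let value := if pvPathEnvVars.contains kv.1 then pvTranslatePath kv.2 sysroot else kv.2
            new_env.insert kv.1 value) PySem.Dict.empty).items
      = (orig_env.foldl
          (fun (new_env : PySem.Dict String String) kv =>
            let value := if pvPathEnvVars.contains kv.1 then pvTranslatePath kv.2 sysroot else kv.2
            new_env.insert kv.1 value)
          (PySem.Dict.mk (((PySem.Dict.empty : PySem.Dict String String)).items.map
            (pvPatch sysroot pvPathEnvVars)))).items := by rw [← h0]
    _ = _ := by rw [pv_foldA_eq sysroot orig_env PySem.Dict.empty]
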